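-- pv_equiv track=rewrite | github.com/MrBrantCode/unitest_baseline | mut_generate/mist_train_cf/cf_77941/solution.py | find_divisors_and_prime_factors
-- ===== SOURCE A (Python) =====
-- def find_divisors_and_prime_factors(n):
--     def prime_factors(div):
--         i = 2
--         factors = []
--         while i * i <= div:
--             if div % i:
--                 i += 1
--             else:
--                 div //= i
--                 factors.append(i)
--         if div > 1:
--             factors.append(div)
--         return factors
--
--     i = 2
--     factor_dict = {}
--     while i <= n//2:
--         if n % i:
--             i += 1
--             continue
--         else:
--             factor_dict[i] = prime_factors(i)
--         i += 1
--     return factor_dict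
-- ===== SOURCE B (Python) =====
-- def find_divisors_and_prime_factors(n):
--     def prime_factors(d):
--         i = 2
--         while i * i <= d:
--             if d % i == 0:
--                 return [i] + prime_factors(d // i)
--             i += 1
--         return [d] if d > 1 else []
--
--     small = []
--     large = []
--     i = 2
--     while i * i <= n:
--         if n % i == 0:
--             small.append(i)
--             q = n // i
--             if q != i:
--                 large.append(q)
--         i += 1
--     return {d: prime_factors(d) for d in small + large[::-1]}
-- ===== Notes on version B (the rewrite author's own statement) =====
-- stated objective: faster
-- what changed: A scans every candidate i in [2, n//2] and factors each divisor with an iterative while loop; B enumerates divisors only by trial division up to sqrt(n) (each small divisor plus its cofactor n//i, concatenated as small + reversed cofactors to keep ascending order) and factors each divisor with a recursive smallest-factor routine.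
import Mathlib
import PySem

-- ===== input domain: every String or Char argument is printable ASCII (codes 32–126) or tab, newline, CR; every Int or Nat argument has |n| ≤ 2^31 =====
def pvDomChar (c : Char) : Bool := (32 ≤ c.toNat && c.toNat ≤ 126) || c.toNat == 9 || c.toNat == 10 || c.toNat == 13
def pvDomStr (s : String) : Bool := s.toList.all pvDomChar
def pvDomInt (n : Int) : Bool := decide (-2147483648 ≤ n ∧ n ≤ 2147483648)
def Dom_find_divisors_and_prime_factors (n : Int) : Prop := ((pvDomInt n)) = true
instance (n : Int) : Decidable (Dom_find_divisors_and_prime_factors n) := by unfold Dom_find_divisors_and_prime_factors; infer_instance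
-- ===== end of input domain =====

-- B replaces A's scan of all of [2, n//2] by trial division up to sqrt(n) and A's
-- iterative factoring loop by a recursive smallest-factor routine; objective: faster.

-- ===== PORT A =====
-- A's inner helper prime_factors: the while loop, with the extra guard 2 ≤ i only for
-- totality (every call starts at i = 2 and i never decreases, so the guard never changes the value)
-- termination measures, hoisted to named lemmas the recursive defs cite by name
-- (proofs kept elementary and small on purpose)
theorem pvDecPF1 (i div : Int) (h : 2 ≤ i ∧ i * i ≤ div) :
    (div - (i + 1)).toNat < (div - i).toNat := by
  obtain ⟨h1, h2⟩ := h
  have h3 : 2 * i ≤ i * i := mul_le_mul_of_nonneg_right h1 (le_trans (by decide) h1)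
  omega

theorem pvDecPF2 (i div : Int) (h : 2 ≤ i ∧ i * i ≤ div) :
    (PySem.Int.floordiv div i - i).toNat < (div - i).toNat := by
  obtain ⟨h1, h2⟩ := h
  have h0 : (0:Int) < i := lt_of_lt_of_le (by decide) h1
  have hfd : PySem.Int.floordiv div i = div / i := PySem.Int.floordiv_eq_ediv_of_pos h0
  have hdpos : (0:Int) < div := lt_of_lt_of_le (mul_pos h0 h0) h2
  have hge : (0:Int) ≤ div / i := Int.ediv_nonneg (le_of_lt hdpos) (le_of_lt h0)
  have hqi : div / i * i ≤ div := Int.ediv_mul_le div (ne_of_gt h0)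
  have h2q : div / i * 2 ≤ div / i * i := mul_le_mul_of_nonneg_left h1 hge
  have h3 : 2 * i ≤ i * i := mul_le_mul_of_nonneg_right h1 (le_of_lt h0)
  rw [hfd]
  omega

theorem pvDecRec1 (i d : Int) (h : 2 ≤ i ∧ i * i ≤ d) :
    (PySem.Int.floordiv d i).toNat < d.toNat := by
  obtain ⟨h1, h2⟩ := h
  have h0 : (0:Int) < i := lt_of_lt_of_le (by decide) h1
  have hfd : PySem.Int.floordiv d i = d / i := PySem.Int.floordiv_eq_ediv_of_pos h0
  have hdpos : (0:Int) < d := lt_of_lt_of_le (mul_pos h0 h0) h2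
  have hge : (0:Int) ≤ d / i := Int.ediv_nonneg (le_of_lt hdpos) (le_of_lt h0)
  have hqi : d / i * i ≤ d := Int.ediv_mul_le d (ne_of_gt h0)
  have h2q : d / i * 2 ≤ d / i * i := mul_le_mul_of_nonneg_left h1 hge
  have h3 : 2 * i ≤ i * i := mul_le_mul_of_nonneg_right h1 (le_of_lt h0)
  rw [hfd]
  omega

theorem pvDecRec2 (i d : Int) (h : 2 ≤ i ∧ i * i ≤ d) :
    (d + 1 - (i + 1)).toNat < (d + 1 - i).toNat := by
  obtain ⟨h1, h2⟩ := h
  have h3 : 2 * i ≤ i * i := mul_le_mul_of_nonneg_right h1 (le_trans (by decide) h1)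
  omega

theorem pvDecCollect (n i : Int) (h : i * i ≤ n) :
    (n + 1 - (i + 1)).toNat < (n + 1 - i).toNat := by
  have h0 : (0:Int) ≤ i * i := mul_self_nonneg i
  by_cases hi : i ≤ 0
  · omega
  · have h3 : i * 1 ≤ i * i := mul_le_mul_of_nonneg_left (by omega) (by omega)
    omega

def pvPF (i div : Int) (factors : List Int) : List Int :=
  if h : 2 ≤ i ∧ i * i ≤ div then
    if PySem.Int.mod div i ≠ 0 then
      pvPF (i + 1) div factors
    else
      pvPF i (PySem.Int.floordiv div i) (factors ++ [i])
  else
    if 1 < div then factors ++ [div] else factors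
termination_by (div - i).toNat
decreasing_by
  · exact pvDecPF1 i div h
  · exact pvDecPF2 i div h

def pvPrimeFactors (div : Int) : List Int := pvPF 2 div []

-- A's main while loop: i from 2 while i ≤ n//2, inserting each divisor with its factors
def find_divisors_and_prime_factors (n : Int) : List (Int × List Int) :=
  ((PySem.List.pyRange 2 (PySem.Int.floordiv n 2 + 1) 1).foldl
      (fun d i => if PySem.Int.mod n i ≠ 0 then d else d.insert i (pvPrimeFactors i))
      PySem.Dict.empty).items

-- ===== PORT B =====
-- B's recursive prime_factors: scan i upward; at the first divisor cons it and recurse on d // i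
-- (restarting the scan at 2, as Source B does); the guard 2 ≤ i is only for totality.
def pvPFRec (i d : Int) : List Int :=
  if _h : 2 ≤ i ∧ i * i ≤ d then
    if PySem.Int.mod d i = 0 then
      [i] ++ pvPFRec 2 (PySem.Int.floordiv d i)
    else
      pvPFRec (i + 1) d
  else
    if 1 < d then [d] else []
termination_by (d.toNat, (d + 1 - i).toNat)
decreasing_by
  · exact Prod.Lex.left _ _ (pvDecRec1 i d _h)
  · exact Prod.Lex.right _ (pvDecRec2 i d _h)

-- B's loop: i from 2 while i*i ≤ n, collecting small divisors and their cofactors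
def pvCollect (n i : Int) (small large : List Int) : List Int × List Int :=
  if h : i * i ≤ n then
    if PySem.Int.mod n i = 0 then
      let q := PySem.Int.floordiv n i
      pvCollect n (i + 1) (small ++ [i]) (if q ≠ i then large ++ [q] else large)
    else
      pvCollect n (i + 1) small large
  else
    (small, large)
termination_by (n + 1 - i).toNat
decreasing_by
  · exact pvDecCollect n i h
  · exact pvDecCollect n i h

def find_divisors_and_prime_factors_alt (n : Int) : List (Int × List Int) :=
  let p := pvCollect n 2 [] []
  (p.1 ++ p.2.reverse).map (fun d => (d, pvPFRec 2 d))

-- ===== PRECONDITION & SPEC =====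
def Spec_find_divisors_and_prime_factors (n : Int) (out : List (Int × List Int)) : Prop := out = find_divisors_and_prime_factors_alt n
instance (n : Int) (out : List (Int × List Int)) : Decidable (Spec_find_divisors_and_prime_factors n out) := by unfold Spec_find_divisors_and_prime_factors; infer_instance

-- ===== CLAIM (what is proved, stated in full; the proofs are below) =====
def Claim_equal_find_divisors_and_prime_factors : Prop := ∀ (n : Int), Dom_find_divisors_and_prime_factors n → Spec_find_divisors_and_prime_factors n (find_divisors_and_prime_factors n)

-- ===== LEMMAS AND PROOFS =====

-- ---- equality of the two prime_factors routines ----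

-- one skipped candidate
theorem pvPFRec_skip_one {j d : Int} (hj : 2 ≤ j) (hm : PySem.Int.mod d j ≠ 0) :
    pvPFRec j d = pvPFRec (j + 1) d := by
  by_cases hjj : j * j ≤ d
  · rw [pvPFRec]
    simp [hj, hjj, hm]
  · have h1 : ¬ (2 ≤ j ∧ j * j ≤ d) := by tauto
    have h2 : ¬ (2 ≤ j + 1 ∧ (j + 1) * (j + 1) ≤ d) := by
      rintro ⟨-, hc⟩; nlinarith
    rw [pvPFRec, dif_neg h1, pvPFRec, dif_neg h2]

-- scanning from j or from i is the same when no candidate in [j, i) divides d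
theorem pvPFRec_skip {d : Int} (j i : Int) (hj : 2 ≤ j) (hji : j ≤ i)
    (hnd : ∀ k, j ≤ k → k < i → PySem.Int.mod d k ≠ 0) :
    pvPFRec j d = pvPFRec i d := by
  obtain ⟨m, hm⟩ : ∃ m : ℕ, i = j + m := ⟨(i - j).toNat, by omega⟩
  subst hm
  induction m generalizing j with
  | zero => simp
  | succ t ih =>
    rw [pvPFRec_skip_one hj (hnd j le_rfl (by push_cast; omega))]
    rw [ih (j + 1) (by omega) (by push_cast; omega)
      (fun k hk1 hk2 => hnd k (by omega) (by push_cast at hk2 ⊢; omega))]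
    congr 1
    push_cast
    ring

-- A's loop state equals factors ++ B's recursive result, under A's invariant that
-- no candidate below i divides div
theorem pvPF_eq_rec (i div : Int) (factors : List Int) :
    2 ≤ i → (∀ k, 2 ≤ k → k < i → PySem.Int.mod div k ≠ 0) →
    pvPF i div factors = factors ++ pvPFRec 2 div := by
  induction i, div, factors using pvPF.induct with
  | case1 i div factors h hm ih =>
    intro hi hnd
    rw [pvPF]
    simp only [dif_pos h, if_pos hm]
    exact ih (by omega) (fun k hk1 hk2 => by
      rcases lt_or_eq_of_le (show k ≤ i by omega) with hlt | rfl
      · exact hnd k hk1 hlt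
      · exact hm)
  | case2 i div factors h hm ih =>
    intro hi hnd
    rw [not_not] at hm
    rw [pvPF]
    simp only [dif_pos h, hm]
    simp only [ne_eq, not_true_eq_false, if_false]
    have hipos : (0:Int) < i := by omega
    have hdvd : i ∣ div := (PySem.Int.mod_eq_zero_iff_dvd div i).mp hm
    have hfd : PySem.Int.floordiv div i = div / i := PySem.Int.floordiv_eq_ediv_of_pos hipos
    have hq : div / i * i = div := Int.ediv_mul_cancel hdvd
    have hrec : ∀ k, 2 ≤ k → k < i → PySem.Int.mod (PySem.Int.floordiv div i) k ≠ 0 := by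
      intro k hk1 hk2 hmk
      have hkdvd : k ∣ PySem.Int.floordiv div i :=
        (PySem.Int.mod_eq_zero_iff_dvd _ k).mp hmk
      rw [hfd] at hkdvd
      have : k ∣ div := hkdvd.trans ⟨i, hq.symm⟩
      exact hnd k hk1 hk2 ((PySem.Int.mod_eq_zero_iff_dvd div k).mpr this)
    rw [ih hi hrec]
    have hstep : pvPFRec 2 div = [i] ++ pvPFRec 2 (PySem.Int.floordiv div i) := by
      rw [pvPFRec_skip 2 i (le_refl 2) hi hnd, pvPFRec]
      simp [h, hm]
    rw [hstep]
    simp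
  | case3 i div factors h hd =>
    intro hi hnd
    rw [pvPF]
    simp only [dif_neg h]
    rw [pvPFRec_skip 2 i (le_refl 2) hi hnd, pvPFRec]
    simp only [dif_neg h]
    simp [hd]
  | case4 i div factors h hd =>
    intro hi hnd
    rw [pvPF]
    simp only [dif_neg h]
    rw [pvPFRec_skip 2 i (le_refl 2) hi hnd, pvPFRec]
    simp only [dif_neg h]
    simp [hd]

theorem primeFactors_eq (d : Int) : pvPrimeFactors d = pvPFRec 2 d := by
  unfold pvPrimeFactors
  rw [pvPF_eq_rec 2 d [] (le_refl 2) (fun k hk1 hk2 => absurd (by omega : (2:Int) ≤ 2) (by omega))]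
  simp

-- ---- the divisor enumeration ----

-- the small divisors: divisors j of n with i ≤ j and j*j ≤ n, in increasing order
def pvS (n i : Int) : List Int :=
  (PySem.List.pyRange i (n + 1) 1).filter
    (fun j => decide (j * j ≤ n) && decide (PySem.Int.mod n j = 0))

-- their cofactors n // j (skipping the square root), in the order produced
def pvL (n i : Int) : List Int :=
  ((pvS n i).filter (fun j => decide (PySem.Int.floordiv n j ≠ j))).map
    (fun j => PySem.Int.floordiv n j)

theorem mem_pvS {n i j : Int} (hi : 2 ≤ i) :
    j ∈ pvS n i ↔ i ≤ j ∧ j * j ≤ n ∧ j ∣ n := by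
  unfold pvS
  simp only [List.mem_filter, PySem.List.mem_pyRange_one, Bool.and_eq_true,
    decide_eq_true_eq, PySem.Int.mod_eq_zero_iff_dvd]
  constructor
  · rintro ⟨⟨h1, _⟩, h3, h4⟩; exact ⟨h1, h3, h4⟩
  · rintro ⟨h1, h3, h4⟩; exact ⟨⟨h1, by nlinarith⟩, h3, h4⟩

theorem pvS_cons {n i : Int} (hi : 2 ≤ i) (h : i * i ≤ n) :
    pvS n i = (if PySem.Int.mod n i = 0 then [i] else []) ++ pvS n (i + 1) := by
  unfold pvS
  rw [PySem.List.pyRange_one_cons (show i < n + 1 by nlinarith), List.filter_cons]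
  by_cases hm : PySem.Int.mod n i = 0 <;> simp [h, hm]

theorem pvS_nil {n i : Int} (hi : 2 ≤ i) (h : ¬ i * i ≤ n) : pvS n i = [] := by
  unfold pvS
  rw [List.filter_eq_nil_iff]
  intro j hj
  rw [PySem.List.mem_pyRange_one] at hj
  simp only [Bool.and_eq_true, decide_eq_true_eq, not_and]
  intro hjj
  exfalso
  have : i ≤ j := hj.1
  nlinarith

theorem pvL_cons {n i : Int} (hi : 2 ≤ i) (h : i * i ≤ n) (hm : PySem.Int.mod n i = 0) :
    pvL n i = (if PySem.Int.floordiv n i ≠ i then [PySem.Int.floordiv n i] else []) ++ pvL n (i + 1) := by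
  unfold pvL
  rw [pvS_cons hi h]
  by_cases hq : PySem.Int.floordiv n i ≠ i <;> simp [hm, hq]

theorem pvL_cons' {n i : Int} (hi : 2 ≤ i) (h : i * i ≤ n) (hm : ¬ PySem.Int.mod n i = 0) :
    pvL n i = pvL n (i + 1) := by
  unfold pvL
  rw [pvS_cons hi h]
  simp [hm]

theorem pvL_nil {n i : Int} (hi : 2 ≤ i) (h : ¬ i * i ≤ n) : pvL n i = [] := by
  unfold pvL
  rw [pvS_nil hi h]
  rfl

theorem collect_eq (n i : Int) (s l : List Int) :
    2 ≤ i → pvCollect n i s l = (s ++ pvS n i, l ++ pvL n i) := by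
  induction i, s, l using pvCollect.induct n with
  | case1 i small large h hm q ih =>
    intro hi
    rw [pvCollect]
    simp only [dif_pos h, if_pos hm]
    have hrest : (small ++ [i] ++ pvS n (i + 1),
        (if PySem.Int.floordiv n i ≠ i then large ++ [PySem.Int.floordiv n i] else large)
          ++ pvL n (i + 1)) = (small ++ pvS n i, large ++ pvL n i) := by
      rw [pvS_cons hi h, pvL_cons hi h hm, if_pos hm]
      simp only [Prod.mk.injEq]
      refine ⟨by simp, ?_⟩
      by_cases hq : PySem.Int.floordiv n i ≠ i <;> simp [hq]
    exact (ih (by omega)).trans hrest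
  | case2 i small large h hm ih =>
    intro hi
    rw [pvCollect]
    simp only [dif_pos h, if_neg hm]
    rw [ih (by omega)]
    rw [pvS_cons hi h, pvL_cons' hi h hm, if_neg hm]
    simp
  | case3 i small large h =>
    intro hi
    rw [pvCollect]
    simp only [dif_neg h]
    rw [pvS_nil hi h, pvL_nil hi h]
    simp

theorem mem_pvL {n q : Int} :
    q ∈ pvL n 2 ↔ ∃ j, (2 ≤ j ∧ j * j ≤ n ∧ j ∣ n) ∧
      PySem.Int.floordiv n j ≠ j ∧ PySem.Int.floordiv n j = q := by
  unfold pvL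
  simp only [List.mem_map, List.mem_filter, decide_eq_true_eq]
  constructor
  · rintro ⟨j, ⟨hjS, hne⟩, heq⟩
    exact ⟨j, (mem_pvS (le_refl 2)).mp hjS, hne, heq⟩
  · rintro ⟨j, hjS, hne, heq⟩
    exact ⟨j, ⟨(mem_pvS (le_refl 2)).mpr hjS, hne⟩, heq⟩

theorem divisors_eq (n : Int) :
    (PySem.List.pyRange 2 (PySem.Int.floordiv n 2 + 1) 1).filter
        (fun j => decide (PySem.Int.mod n j = 0))
      = pvS n 2 ++ (pvL n 2).reverse := by
  -- membership characterisation of the left-hand side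
  have hF : ∀ x, x ∈ (PySem.List.pyRange 2 (PySem.Int.floordiv n 2 + 1) 1).filter
      (fun j => decide (PySem.Int.mod n j = 0)) ↔ 2 ≤ x ∧ x * 2 ≤ n ∧ x ∣ n := by
    intro x
    simp only [List.mem_filter, PySem.List.mem_pyRange_one, decide_eq_true_eq,
      PySem.Int.mod_eq_zero_iff_dvd]
    rw [show (x < PySem.Int.floordiv n 2 + 1) = (x ≤ PySem.Int.floordiv n 2) by
      simp]
    rw [PySem.Int.le_floordiv_iff_mul_le (by omega)]
    tauto
  -- same members on the two sides
  have hmem : ∀ x, x ∈ (PySem.List.pyRange 2 (PySem.Int.floordiv n 2 + 1) 1).filter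
      (fun j => decide (PySem.Int.mod n j = 0)) ↔ x ∈ pvS n 2 ++ (pvL n 2).reverse := by
    intro x
    rw [hF, List.mem_append, List.mem_reverse, mem_pvS (le_refl 2), mem_pvL]
    constructor
    · rintro ⟨hx2, hx2n, hdvd⟩
      by_cases hs : x * x ≤ n
      · exact Or.inl ⟨hx2, hs, hdvd⟩
      · right
        obtain ⟨c, hc⟩ := hdvd
        have hc2 : 2 ≤ c := by nlinarith
        have hcx : c < x := by nlinarith
        refine ⟨c, ⟨hc2, by nlinarith, ⟨x, by rw [hc]; ring⟩⟩, ?_, ?_⟩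
        · rw [PySem.Int.floordiv_eq_ediv_of_pos (by omega), hc, mul_comm,
            Int.mul_ediv_cancel_left _ (by omega : c ≠ 0)]
          omega
        · rw [PySem.Int.floordiv_eq_ediv_of_pos (by omega), hc, mul_comm,
            Int.mul_ediv_cancel_left _ (by omega : c ≠ 0)]
    · rintro (⟨h2, hs, hd⟩ | ⟨j, ⟨hj2, hjj, hjd⟩, hne, heq⟩)
      · exact ⟨h2, by nlinarith, hd⟩
      · have hq : n / j * j = n := Int.ediv_mul_cancel hjd
        rw [PySem.Int.floordiv_eq_ediv_of_pos (by omega : (0:Int) < j)] at heq hne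
        subst heq
        have hle : j ≤ n / j := by nlinarith
        have hlt : j < n / j := lt_of_le_of_ne hle (fun h => hne h.symm)
        exact ⟨by omega, by nlinarith, ⟨j, hq.symm⟩⟩
  -- both sides are strictly increasing
  have hPF : ((PySem.List.pyRange 2 (PySem.Int.floordiv n 2 + 1) 1).filter
      (fun j => decide (PySem.Int.mod n j = 0))).Pairwise (· < ·) :=
    (PySem.List.pairwise_lt_pyRange_one 2 (PySem.Int.floordiv n 2 + 1)).filter _
  have hPS : (pvS n 2).Pairwise (· < ·) :=
    (PySem.List.pairwise_lt_pyRange_one 2 (n + 1)).filter _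
  have hPL : ((pvL n 2).reverse).Pairwise (· < ·) := by
    rw [List.pairwise_reverse]
    unfold pvL
    rw [List.pairwise_map]
    refine List.Pairwise.imp_of_mem ?_ (hPS.filter _)
    intro a b ha hb hab
    rw [List.mem_filter] at ha hb
    obtain ⟨ha2, haa, had⟩ := (mem_pvS (le_refl 2)).mp ha.1
    obtain ⟨hb2, hbb, hbd⟩ := (mem_pvS (le_refl 2)).mp hb.1
    have hqa : n / a * a = n := Int.ediv_mul_cancel had
    have hqb : n / b * b = n := Int.ediv_mul_cancel hbd
    rw [PySem.Int.floordiv_eq_ediv_of_pos (by omega : (0:Int) < a),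
      PySem.Int.floordiv_eq_ediv_of_pos (by omega : (0:Int) < b)]
    have hb1 : 1 ≤ n / b := by nlinarith
    nlinarith
  have hcross : ∀ a ∈ pvS n 2, ∀ b ∈ (pvL n 2).reverse, a < b := by
    intro a ha b hb
    obtain ⟨ha2, haa, _⟩ := (mem_pvS (le_refl 2)).mp ha
    rw [List.mem_reverse, mem_pvL] at hb
    obtain ⟨j, ⟨hj2, hjj, hjd⟩, hne, heq⟩ := hb
    have hq : n / j * j = n := Int.ediv_mul_cancel hjd
    rw [PySem.Int.floordiv_eq_ediv_of_pos (by omega : (0:Int) < j)] at heq hne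
    subst heq
    have hle : j ≤ n / j := by nlinarith
    have hlt : j < n / j := lt_of_le_of_ne hle (fun h => hne h.symm)
    nlinarith
  have hPR : (pvS n 2 ++ (pvL n 2).reverse).Pairwise (· < ·) :=
    List.pairwise_append.mpr ⟨hPS, hPL, hcross⟩
  -- strictly increasing lists with the same members are equal
  have hperm : ((PySem.List.pyRange 2 (PySem.Int.floordiv n 2 + 1) 1).filter
        (fun j => decide (PySem.Int.mod n j = 0))).Perm
      (pvS n 2 ++ (pvL n 2).reverse) :=
    (List.perm_ext_iff_of_nodup (hPF.imp ne_of_lt) (hPR.imp ne_of_lt)).mpr hmem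
  exact List.Perm.eq_of_pairwise (fun a b _ _ h1 h2 => absurd h2 (lt_asymm h1)) hPF hPR hperm

-- inserting a nodup list of fresh keys appends the pairs to the items
theorem items_insert_loop (f : Int → List Int) (l : List Int) (d : PySem.Dict Int (List Int))
    (hfresh : ∀ a ∈ l, d.contains a = false) (hnd : l.Nodup) :
    (l.foldl (fun d i => d.insert i (f i)) d).items = d.items ++ l.map (fun i => (i, f i)) := by
  induction l generalizing d with
  | nil => simp
  | cons x t ih =>
    rw [List.foldl_cons, ih]
    · rw [PySem.Dict.items_insert_of_not_contains _ _ (hfresh x (by simp))]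
      simp
    · intro a ha
      rw [PySem.Dict.contains_insert]
      have hax : a ≠ x := by rintro rfl; exact (List.nodup_cons.mp hnd).1 ha
      simp [hax, hfresh a (List.mem_cons_of_mem _ ha)]
    · exact (List.nodup_cons.mp hnd).2

-- A's skip-or-insert loop is the insert loop over the filtered list
theorem foldl_skip (n : Int) (ll : List Int) (d : PySem.Dict Int (List Int)) :
    ll.foldl (fun d i => if PySem.Int.mod n i ≠ 0 then d else d.insert i (pvPrimeFactors i)) d
      = (ll.filter (fun j => decide (PySem.Int.mod n j = 0))).foldl
          (fun d i => d.insert i (pvPrimeFactors i)) d := by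
  induction ll generalizing d with
  | nil => rfl
  | cons x t ih =>
    by_cases hx : PySem.Int.mod n x = 0
    · rw [List.foldl_cons, if_neg (not_not_intro hx), List.filter_cons,
        if_pos (by simpa using hx), List.foldl_cons]
      exact ih _
    · rw [List.foldl_cons, if_pos hx, List.filter_cons, if_neg (by simpa using hx)]
      exact ih _

-- ===== VERDICT (by name: the statement is the Claim_ definition above) =====
theorem find_divisors_and_prime_factors_spec : Claim_equal_find_divisors_and_prime_factors := by
  intro n _
  unfold Spec_find_divisors_and_prime_factors find_divisors_and_prime_factors
    find_divisors_and_prime_factors_alt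
  rw [collect_eq n 2 [] [] (le_refl 2)]
  simp only [List.nil_append]
  rw [foldl_skip]
  rw [items_insert_loop pvPrimeFactors _ _ (fun a _ => PySem.Dict.contains_empty a)
      ((PySem.List.nodup_pyRange_one 2 (PySem.Int.floordiv n 2 + 1)).filter _)]
  rw [divisors_eq n]
  have hf : (fun d => (d, pvPFRec 2 d)) = fun d : Int => (d, pvPrimeFactors d) := by
    funext d; rw [primeFactors_eq]
  rw [hf]
  simp [PySem.Dict.empty]
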